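-- pv_equiv track=rewrite | github.com/aaronstanek/spudlang | src/spudlang/Pattern.py | _check_props
-- ===== SOURCE A (Python) =====
-- def _check_props(rule,sample):
--     # rule is a dict(str->bool)
--     # sample is a set(str)
--     # we want to make sure that all the
--     # elements marked as True appear in the sample
--     # and none of those marked False appear
--     # returns True for a match, False otherwise
--     for prop in rule:
--         if rule[prop]:
--             # it must exist in the set to match
--             if prop not in sample:
--                 return False
--         else:
--             # it cannot exist in the set to match
--             if prop in sample:
--                 return False
--     return True
-- ===== SOURCE B (Python) =====
-- def _check_props(rule, sample):
--     # rule: dict(str->bool), sample: set(str)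
--     trues = {p for p, v in rule.items() if v}
--     falses = {p for p, v in rule.items() if not v}
--     return trues <= sample and sample.isdisjoint(falses)
-- ===== Notes on version B (the rewrite author's own statement) =====
-- stated objective: simpler
-- what changed: Replaces the element-wise loop with early exits by splitting the rule into two sets (required/forbidden props) and deciding with set subset and disjointness operators.
import Mathlib
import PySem

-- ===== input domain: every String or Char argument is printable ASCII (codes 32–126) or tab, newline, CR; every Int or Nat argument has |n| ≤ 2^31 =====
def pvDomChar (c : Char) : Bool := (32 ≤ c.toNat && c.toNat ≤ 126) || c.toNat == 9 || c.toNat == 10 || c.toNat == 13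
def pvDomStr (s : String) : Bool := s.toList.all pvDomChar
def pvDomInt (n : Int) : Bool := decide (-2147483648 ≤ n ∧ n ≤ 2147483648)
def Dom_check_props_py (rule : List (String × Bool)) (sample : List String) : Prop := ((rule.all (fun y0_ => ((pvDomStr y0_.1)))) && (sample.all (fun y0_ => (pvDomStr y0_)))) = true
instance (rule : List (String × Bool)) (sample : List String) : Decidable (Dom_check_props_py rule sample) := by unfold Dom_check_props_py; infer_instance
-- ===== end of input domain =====

-- B replaces A's element-wise loop with early exits by two prop-sets (required / forbidden)
-- checked with set subset and disjointness; objective: simpler.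


-- ===== PORT A =====
-- for prop in rule: test rule[prop] against membership in sample, early-exit False
def check_props_py (rule : List (String × Bool)) (sample : List String) : Bool :=
  match rule with
  | [] => true
  | (prop, v) :: rest =>
    if v then
      if !(PySem.Set.contains sample prop) then false
      else check_props_py rest sample
    else
      if PySem.Set.contains sample prop then false
      else check_props_py rest sample

-- ===== PORT B =====
-- trues = {p for p,v in rule.items() if v}; falses = {p for p,v in rule.items() if not v}
-- return trues <= sample and sample.isdisjoint(falses)
def check_props_py_alt (rule : List (String × Bool)) (sample : List String) : Bool :=
  let trues := PySem.Set.ofList ((rule.filter (fun pv => pv.2)).map (fun pv => pv.1))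
  let falses := PySem.Set.ofList ((rule.filter (fun pv => !pv.2)).map (fun pv => pv.1))
  PySem.Set.issubset trues sample && PySem.Set.isdisjoint sample falses

-- ===== PRECONDITION & SPEC =====
def Spec_check_props_py (rule : List (String × Bool)) (sample : List String) (out : Bool) : Prop := out = check_props_py_alt rule sample
instance (rule : List (String × Bool)) (sample : List String) (out : Bool) : Decidable (Spec_check_props_py rule sample out) := by unfold Spec_check_props_py; infer_instance

-- ===== CLAIM (what is proved, stated in full; the proofs are below) =====
def Claim_equal_check_props_py : Prop := ∀ (rule : List (String × Bool)) (sample : List String), Dom_check_props_py rule sample → Spec_check_props_py rule sample (check_props_py rule sample)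

-- ===== LEMMAS AND PROOFS =====

-- A returns true iff every rule entry's boolean equals membership of its key in sample
theorem check_props_py_iff (rule : List (String × Bool)) (sample : List String) :
    check_props_py rule sample = true ↔ ∀ pv ∈ rule, (pv.1 ∈ sample ↔ pv.2 = true) := by
  induction rule with
  | nil => simp [check_props_py]
  | cons hd tl ih =>
    obtain ⟨p, v⟩ := hd
    cases v <;>
    simp [check_props_py, ih]

-- B returns true iff the same condition holds
theorem check_props_py_alt_iff (rule : List (String × Bool)) (sample : List String) :
    check_props_py_alt rule sample = true ↔ ∀ pv ∈ rule, (pv.1 ∈ sample ↔ pv.2 = true) := by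
  simp only [check_props_py_alt, Bool.and_eq_true, PySem.Set.issubset_iff,
    PySem.Set.isdisjoint_iff, PySem.Set.mem_ofList, List.mem_map, List.mem_filter]
  constructor
  · rintro ⟨h1, h2⟩ ⟨p, v⟩ hmem
    cases v
    · simp only [Bool.false_eq_true, iff_false]
      intro hp
      exact h2 p hp ⟨⟨p, false⟩, ⟨hmem, rfl⟩, rfl⟩
    · simpa using h1 p ⟨⟨p, true⟩, ⟨hmem, rfl⟩, rfl⟩
  · intro h
    refine ⟨?_, ?_⟩
    · rintro p ⟨⟨q, v⟩, ⟨hmem, hv⟩, rfl⟩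
      simp only at hv
      subst hv
      exact (h ⟨q, true⟩ hmem).mpr rfl
    · rintro p hp ⟨⟨q, v⟩, ⟨hmem, hv⟩, rfl⟩
      simp only [Bool.not_eq_true'] at hv
      subst hv
      exact absurd ((h ⟨q, false⟩ hmem).mp hp) (by simp)

-- ===== VERDICT (by name: the statement is the Claim_ definition above) =====
theorem check_props_py_spec : Claim_equal_check_props_py := by
  intro rule sample _
  unfold Spec_check_props_py
  rw [Bool.eq_iff_iff, check_props_py_iff, check_props_py_alt_iff]
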